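-- pv_equiv track=rewrite | github.com/PepperDash/readme-automation | metadata.py | generate_markdown_chart
-- ===== SOURCE A (Python) =====
-- def generate_markdown_chart(joins):
--     markdown_chart = ""
--
--     markdown_chart += "### Digitals\n\n"
--     markdown_chart += "| Join |  Type (RW) | Description|\n"
--     markdown_chart += "| --- | --- |  ---| \n"
--     for join in joins:
--         if join["type"] == "Digital":
--             markdown_chart += f"| {join['join_number']} | R | {join['description']} |\n"
--
--     markdown_chart += "\n### Analogs\n\n"
--     markdown_chart += "| Join | Type (RW) | Description |\n"
--     markdown_chart += "| --- | --- | --- |\n"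
--     for join in joins:
--         if join["type"] == "Analog":
--             markdown_chart += f"| {join['join_number']} | R | {join['description']}\n"
--
--     markdown_chart += "\n### Serials\n\n"
--     markdown_chart += "| Join | Type (RW) | Description |\n"
--     markdown_chart += "| --- | --- |  ---|\n"
--     for join in joins:
--         if join["type"] == "Serial":
--             markdown_chart += f"| {join['join_number']} | R | {join['description']}|\n"
--     return markdown_chart
-- ===== SOURCE B (Python) =====
-- def generate_markdown_chart(joins):
--     rows = {"Digital": [], "Analog": [], "Serial": []}
--     templates = {
--         "Digital": "| {} | R | {} |\n",
--         "Analog": "| {} | R | {}\n",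
--         "Serial": "| {} | R | {}|\n",
--     }
--     for join in joins:
--         t = join["type"]
--         if t in rows:
--             rows[t].append(templates[t].format(join["join_number"], join["description"]))
--     return (
--         "### Digitals\n\n| Join |  Type (RW) | Description|\n| --- | --- |  ---| \n"
--         + "".join(rows["Digital"])
--         + "\n### Analogs\n\n| Join | Type (RW) | Description |\n| --- | --- | --- |\n"
--         + "".join(rows["Analog"])
--         + "\n### Serials\n\n| Join | Type (RW) | Description |\n| --- | --- |  ---|\n"
--         + "".join(rows["Serial"])
--     )
-- ===== Notes on version B (the rewrite author's own statement) =====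
-- stated objective: alternative
-- what changed: B makes a single bucketing pass over joins into three per-type row lists and then emits the three fixed sections by joining each bucket, instead of A's three separate scans that grow one string section by section.
import Mathlib
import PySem

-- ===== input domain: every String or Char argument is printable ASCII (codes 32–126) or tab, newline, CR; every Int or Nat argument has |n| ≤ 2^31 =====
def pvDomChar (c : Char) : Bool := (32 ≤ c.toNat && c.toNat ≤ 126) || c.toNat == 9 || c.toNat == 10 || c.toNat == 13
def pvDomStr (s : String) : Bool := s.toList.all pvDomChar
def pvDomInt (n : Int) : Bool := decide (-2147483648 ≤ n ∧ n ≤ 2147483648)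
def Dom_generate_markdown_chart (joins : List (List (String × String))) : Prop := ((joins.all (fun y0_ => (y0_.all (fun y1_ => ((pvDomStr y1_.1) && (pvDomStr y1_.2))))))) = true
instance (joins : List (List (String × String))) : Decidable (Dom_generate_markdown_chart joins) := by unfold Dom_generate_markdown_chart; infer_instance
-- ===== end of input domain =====

-- B differs only in decomposition (one bucketing pass, then emit), the return value is identical; no mutation.
-- dict lookup with default "" (Pre_ guarantees the key is present where the Python reads it)
def pvGetD (j : List (String × String)) (k : String) : String :=
  PySem.Dict.getD (PySem.Dict.mk j) k ""

-- the three row templates (identical literals in both Pythons)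
def rowDig (j : List (String × String)) : String :=
  "| " ++ pvGetD j "join_number" ++ " | R | " ++ pvGetD j "description" ++ " |\n"
def rowAna (j : List (String × String)) : String :=
  "| " ++ pvGetD j "join_number" ++ " | R | " ++ pvGetD j "description" ++ "\n"
def rowSer (j : List (String × String)) : String :=
  "| " ++ pvGetD j "join_number" ++ " | R | " ++ pvGetD j "description" ++ "|\n"

-- ===== PORT A =====
def generate_markdown_chart (joins : List (List (String × String))) : String :=
  let md := ""
  let md := md ++ "### Digitals\n\n"
  let md := md ++ "| Join |  Type (RW) | Description|\n"
  let md := md ++ "| --- | --- |  ---| \n"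
  let md := joins.foldl (fun acc j =>
    if pvGetD j "type" == "Digital" then acc ++ rowDig j else acc) md
  let md := md ++ "\n### Analogs\n\n"
  let md := md ++ "| Join | Type (RW) | Description |\n"
  let md := md ++ "| --- | --- | --- |\n"
  let md := joins.foldl (fun acc j =>
    if pvGetD j "type" == "Analog" then acc ++ rowAna j else acc) md
  let md := md ++ "\n### Serials\n\n"
  let md := md ++ "| Join | Type (RW) | Description |\n"
  let md := md ++ "| --- | --- |  ---|\n"
  let md := joins.foldl (fun acc j =>
    if pvGetD j "type" == "Serial" then acc ++ rowSer j else acc) md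
  md

-- ===== PORT B =====
def generate_markdown_chart_alt (joins : List (List (String × String))) : String :=
  let b := joins.foldl (fun (b : List String × List String × List String) j =>
    let t := pvGetD j "type"
    if t == "Digital" then (b.1 ++ [rowDig j], b.2.1, b.2.2)
    else if t == "Analog" then (b.1, b.2.1 ++ [rowAna j], b.2.2)
    else if t == "Serial" then (b.1, b.2.1, b.2.2 ++ [rowSer j])
    else b) ([], [], [])
  "### Digitals\n\n| Join |  Type (RW) | Description|\n| --- | --- |  ---| \n"
    ++ String.join b.1
    ++ "\n### Analogs\n\n| Join | Type (RW) | Description |\n| --- | --- | --- |\n"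
    ++ String.join b.2.1
    ++ "\n### Serials\n\n| Join | Type (RW) | Description |\n| --- | --- |  ---|\n"
    ++ String.join b.2.2

-- ===== PRECONDITION & SPEC =====
-- Pre_ excludes exactly the joins where Python A raises KeyError: a join without a "type" key,
-- or one whose type is Digital/Analog/Serial but lacks "join_number" or "description".
def Pre_generate_markdown_chart (joins : List (List (String × String))) : Prop :=
  (joins.all (fun j =>
    let d := PySem.Dict.mk j
    d.contains "type" &&
    (!(d.getD "type" "" == "Digital" || d.getD "type" "" == "Analog" || d.getD "type" "" == "Serial")
      || (d.contains "join_number" && d.contains "description")))) = true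
instance (joins : List (List (String × String))) : Decidable (Pre_generate_markdown_chart joins) := by
  unfold Pre_generate_markdown_chart; infer_instance

def pvWitness_generate_markdown_chart : (List (List (String × String))) :=
  [[("type", "Digital"), ("join_number", "1"), ("description", "a join")], [("type", "Other")]]

def Spec_generate_markdown_chart (joins : List (List (String × String))) (out : String) : Prop := out = generate_markdown_chart_alt joins
instance (joins : List (List (String × String))) (out : String) : Decidable (Spec_generate_markdown_chart joins out) := by unfold Spec_generate_markdown_chart; infer_instance

-- ===== CLAIM (what is proved, stated in full; the proofs are below) =====
def Claim_equal_generate_markdown_chart : Prop := ∀ (joins : List (List (String × String))), Dom_generate_markdown_chart joins → Pre_generate_markdown_chart joins → Spec_generate_markdown_chart joins (generate_markdown_chart joins)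

-- ===== LEMMAS AND PROOFS =====

-- folding ++ from s over a list of strings appends the joined list
theorem foldl_append_join (l : List String) (s : String) :
    l.foldl (fun r x => r ++ x) s = s ++ String.join l := by
  induction l generalizing s with
  | nil =>
    simp only [List.foldl_nil]
    rw [show String.join ([] : List String) = "" from rfl, String.append_empty]
  | cons x xs ih =>
    simp only [List.foldl_cons, ih]
    rw [show String.join (x :: xs) = List.foldl (fun r y => r ++ y) ("" ++ x) xs from rfl,
      ih, String.empty_append, String.append_assoc]

theorem join_cons (x : String) (l : List String) :
    String.join (x :: l) = x ++ String.join l := by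
  rw [show String.join (x :: l) = List.foldl (fun r y => r ++ y) ("" ++ x) l from rfl,
    foldl_append_join, String.empty_append]

-- A's section loop, started from s, appends the joined filtered rows
theorem section_foldl (cond : List (String × String) → Bool)
    (row : List (String × String) → String)
    (joins : List (List (String × String))) (s : String) :
    joins.foldl (fun acc j => if cond j then acc ++ row j else acc) s
      = s ++ String.join ((joins.filter cond).map row) := by
  induction joins generalizing s with
  | nil =>
    simp only [List.foldl_nil, List.filter_nil, List.map_nil]
    rw [show String.join ([] : List String) = "" from rfl, String.append_empty]
  | cons j js ih =>
    by_cases h : cond j = true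
    · simp only [List.foldl_cons, List.filter_cons, h, if_true, List.map_cons, ih]
      rw [join_cons, String.append_assoc]
    · simp only [List.foldl_cons, List.filter_cons, h, Bool.false_eq_true, if_false, ih]

-- B's single pass computes the three filtered row lists
theorem bucket_foldl (joins : List (List (String × String)))
    (d a s : List String) :
    joins.foldl (fun (b : List String × List String × List String) j =>
      let t := pvGetD j "type"
      if t == "Digital" then (b.1 ++ [rowDig j], b.2.1, b.2.2)
      else if t == "Analog" then (b.1, b.2.1 ++ [rowAna j], b.2.2)
      else if t == "Serial" then (b.1, b.2.1, b.2.2 ++ [rowSer j])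
      else b) (d, a, s)
    = (d ++ (joins.filter (fun j => pvGetD j "type" == "Digital")).map rowDig,
       a ++ (joins.filter (fun j => pvGetD j "type" == "Analog")).map rowAna,
       s ++ (joins.filter (fun j => pvGetD j "type" == "Serial")).map rowSer) := by
  induction joins generalizing d a s with
  | nil => simp
  | cons j js ih =>
    simp only [List.foldl_cons, List.filter_cons]
    by_cases hD : (pvGetD j "type" == "Digital") = true
    · have hA : (pvGetD j "type" == "Analog") = false := by
        simp only [beq_iff_eq] at hD ⊢; simp [hD]
      have hS : (pvGetD j "type" == "Serial") = false := by
        simp only [beq_iff_eq] at hD ⊢; simp [hD]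
      simp only [hD, hA, hS, if_true, Bool.false_eq_true, if_false, ih, List.map_cons]
      simp [List.append_assoc]
    · by_cases hA : (pvGetD j "type" == "Analog") = true
      · have hS : (pvGetD j "type" == "Serial") = false := by
          simp only [beq_iff_eq] at hA ⊢; simp [hA]
        simp only [hD, hA, hS, if_true, Bool.false_eq_true, if_false, ih, List.map_cons]
        simp [List.append_assoc]
      · by_cases hS : (pvGetD j "type" == "Serial") = true
        · simp only [hD, hA, hS, if_true, Bool.false_eq_true, if_false, ih, List.map_cons]
          simp [List.append_assoc]
        · simp only [hD, hA, hS, Bool.false_eq_true, if_false, ih]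

-- ===== VERDICT (by name: the statement is the Claim_ definition above) =====
theorem generate_markdown_chart_spec : Claim_equal_generate_markdown_chart := by
  intro joins _ _
  show generate_markdown_chart joins = generate_markdown_chart_alt joins
  have hH1 : ("### Digitals\n\n| Join |  Type (RW) | Description|\n| --- | --- |  ---| \n" : String)
      = "" ++ "### Digitals\n\n" ++ "| Join |  Type (RW) | Description|\n" ++ "| --- | --- |  ---| \n" := rfl
  have hH2 : ("\n### Analogs\n\n| Join | Type (RW) | Description |\n| --- | --- | --- |\n" : String)
      = "\n### Analogs\n\n" ++ "| Join | Type (RW) | Description |\n" ++ "| --- | --- | --- |\n" := rfl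
  have hH3 : ("\n### Serials\n\n| Join | Type (RW) | Description |\n| --- | --- |  ---|\n" : String)
      = "\n### Serials\n\n" ++ "| Join | Type (RW) | Description |\n" ++ "| --- | --- |  ---|\n" := rfl
  simp only [generate_markdown_chart, generate_markdown_chart_alt, bucket_foldl,
    section_foldl, hH1, hH2, hH3, List.nil_append, String.append_assoc]
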